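-- pv_equiv track=rewrite | github.com/jjm6604/problem | 프로그래머스/1/140108. 문자열 나누기/문자열 나누기.py | solution
-- ===== SOURCE A (Python) =====
-- def solution(s):
--     answer = 0
--     flag = True
--     for i in range(len(s)):
--         if flag:
--             answer += 1
--             start = s[i]
--             cnt1 = 0
--             cnt2 = 0
--             flag = False
--
--         if s[i] == start:
--             cnt2 += 1
--         else:
--             cnt1 += 1
--         if cnt1 == cnt2:
--             flag = True
--     return answer
-- ===== SOURCE B (Python) =====
-- def solution(s):
--     t = list(s)
--     answer = 0
--     while t:
--         answer += 1
--         n = len(t)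
--         k = n
--         for j in range(1, n + 1):
--             if 2 * t[:j].count(t[0]) == j:
--                 k = j
--                 break
--         t = t[k:]
--     return answer
-- ===== Notes on version B (the rewrite author's own statement) =====
-- stated objective: alternative
-- what changed: Replaces A's flag-driven single pass with running counters by a loop over slices: each iteration finds the first balanced prefix length declaratively by re-counting the pivot character in each prefix (t[:j].count), then slices that chunk off; no counter state is carried across characters.
import Mathlib
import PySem

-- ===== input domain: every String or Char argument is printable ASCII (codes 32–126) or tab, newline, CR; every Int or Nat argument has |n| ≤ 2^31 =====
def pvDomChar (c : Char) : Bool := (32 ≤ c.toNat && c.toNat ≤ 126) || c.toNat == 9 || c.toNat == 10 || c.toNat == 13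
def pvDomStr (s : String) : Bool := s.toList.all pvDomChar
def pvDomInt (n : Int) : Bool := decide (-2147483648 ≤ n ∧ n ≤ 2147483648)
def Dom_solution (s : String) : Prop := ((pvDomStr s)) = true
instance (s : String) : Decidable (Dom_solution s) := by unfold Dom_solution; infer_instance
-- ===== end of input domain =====

-- B replaces A's flag-driven stateful single pass by a loop over slices: each iteration finds
-- the first balanced prefix length by re-counting the pivot char in each prefix (t[:j].count),
-- then slices it off; alternative decomposition, no counter state carried across characters.


-- ===== PORT A =====
-- loop body of A; state: (answer, flag, start, cnt1, cnt2).  'start' gets a dummy initial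
-- value: flag starts true, so it is always assigned before being read, as in the Python.
def solutionStepA (st : Int × Bool × Char × Int × Int) (c : Char) : Int × Bool × Char × Int × Int :=
  let (answer, flag, start, cnt1, cnt2) := st
  let (answer, start, cnt1, cnt2) :=
    if flag then (answer + 1, c, (0 : Int), (0 : Int)) else (answer, start, cnt1, cnt2)
  let (cnt1, cnt2) := if c == start then (cnt1, cnt2 + 1) else (cnt1 + 1, cnt2)
  let flag := cnt1 == cnt2
  (answer, flag, start, cnt1, cnt2)

def solution (s : String) : Int :=
  (s.toList.foldl solutionStepA (0, true, 'a', 0, 0)).1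

-- ===== PORT B =====
-- B's inner for-loop: first j in range(1, n+1) with 2*t[:j].count(t[0]) == j, else k = n.
def solutionSegAlt (t : List Char) (x : Char) : Int :=
  ((PySem.List.pyRange 1 ((t.length : Int) + 1) 1).find?
      (fun j => 2 * ((PySem.List.slice t none (some j)).count x : Int) == j)).getD
    (t.length : Int)

-- needed by solutionGoAlt's termination proof: the found prefix length is ≥ 1 on a cons
theorem solutionSegAlt_pos (x : Char) (r : List Char) : 1 ≤ solutionSegAlt (x :: r) x := by
  unfold solutionSegAlt
  cases hf : (PySem.List.pyRange 1 (((x :: r).length : Int) + 1) 1).find?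
      (fun j => 2 * ((PySem.List.slice (x :: r) none (some j)).count x : Int) == j) with
  | none => simp [Option.getD]
  | some j =>
    have hmem := List.mem_of_find?_eq_some hf
    have := (PySem.List.mem_pyRange_one).mp hmem
    simpa using this.1

theorem solutionSegAlt_slice_lt (x : Char) (r : List Char) :
    (PySem.List.slice (x :: r) (some (solutionSegAlt (x :: r) x)) none).length < (x :: r).length := by
  have h1 := solutionSegAlt_pos x r
  have h0 : (0 : Int) ≤ solutionSegAlt (x :: r) x := by omega
  rw [PySem.List.slice_from _ h0]
  simp only [List.length_drop, List.length_cons]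
  omega

-- B's outer while-loop: one balanced chunk per iteration, slicing it off the front
def solutionLoopAlt : List Char → Int → Int
  | [], answer => answer
  | x :: r, answer =>
    solutionLoopAlt (PySem.List.slice (x :: r) (some (solutionSegAlt (x :: r) x)) none) (answer + 1)
termination_by l => l.length
decreasing_by
  exact solutionSegAlt_slice_lt x r

def solution_alt (s : String) : Int := solutionLoopAlt s.toList 0

-- ===== PRECONDITION & SPEC =====
def Spec_solution (s : String) (out : Int) : Prop := out = solution_alt s
instance (s : String) (out : Int) : Decidable (Spec_solution s out) := by unfold Spec_solution; infer_instance

-- ===== CLAIM (what is proved, stated in full; the proofs are below) =====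
def Claim_equal_solution : Prop := ∀ (s : String), Dom_solution s → Spec_solution s (solution s)

-- ===== LEMMAS AND PROOFS =====

-- Proof-side helpers: A's behaviour is first characterised by an explicit greedy segmentation
-- (solutionGoB / solutionScanB), then that segmentation is shown to equal B's count-based search.

-- scanner: consume one segment with pivot x and counters (same, diff); returns the suffix
def solutionScanB (l : List Char) (x : Char) (same diff : Int) : List Char :=
  if same = diff then l
  else
    match l with
    | [] => []
    | c :: t => if c == x then solutionScanB t x (same + 1) diff
                else solutionScanB t x same (diff + 1)

theorem solutionScanB_length_le (l : List Char) (x : Char) (same diff : Int) :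
    (solutionScanB l x same diff).length ≤ l.length := by
  induction l generalizing same diff with
  | nil => unfold solutionScanB; split <;> simp
  | cons c t ih =>
    unfold solutionScanB
    split
    · simp
    · simp only []
      split <;> exact Nat.le_trans (ih _ _) (Nat.le_succ _)

def solutionGoB : List Char → Int
  | [] => 0
  | x :: t => 1 + solutionGoB (solutionScanB t x 1 0)
termination_by l => l.length
decreasing_by
  exact Nat.lt_succ_of_le (solutionScanB_length_le t x 1 0)

-- first balanced prefix length (with offset δ): least j ≥ 1 with 2·count x (take j) = j + δ, else length
def solutionFfind : List Char → Char → Int → Nat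
  | [], _, _ => 0
  | c :: t, x, δ =>
    if (if c = x then δ - 1 else δ + 1) = 0 then 1
    else 1 + solutionFfind t x (if c = x then δ - 1 else δ + 1)

-- the scanner drops exactly the first balanced prefix
theorem solutionScanB_eq_drop (r : List Char) (x : Char) (a b : Int) (h : a ≠ b) :
    solutionScanB r x a b = r.drop (solutionFfind r x (b - a)) := by
  induction r generalizing a b with
  | nil =>
    unfold solutionScanB
    rw [if_neg h]
    simp
  | cons c t ih =>
    unfold solutionScanB
    rw [if_neg h]
    simp only []
    by_cases hc : c = x
    · rw [if_pos (by simpa using hc)]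
      unfold solutionFfind
      rw [if_pos hc]
      by_cases he : (a + 1) = b
      · have hδ : b - a - 1 = 0 := by omega
        rw [if_pos hδ]
        unfold solutionScanB
        rw [if_pos he]
        simp
      · have hδ : ¬ (b - a - 1 = 0) := by omega
        rw [if_neg hδ]
        have := ih (a + 1) b he
        have harg : b - (a + 1) = b - a - 1 := by ring
        rw [harg] at this
        rw [this, Nat.add_comm 1 _, List.drop_succ_cons]
    · rw [if_neg (by simpa using hc)]
      unfold solutionFfind
      rw [if_neg hc]
      by_cases he : a = (b + 1)
      · have hδ : b - a + 1 = 0 := by omega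
        rw [if_pos hδ]
        unfold solutionScanB
        rw [if_pos he]
        simp
      · have hδ : ¬ (b - a + 1 = 0) := by omega
        rw [if_neg hδ]
        have := ih a (b + 1) he
        have harg : b + 1 - a = b - a + 1 := by ring
        rw [harg] at this
        rw [this, Nat.add_comm 1 _, List.drop_succ_cons]

-- Nat-level form of B's search, for the induction
def solutionNfind (t : List Char) (x : Char) (δ : Int) : Nat :=
  (((List.range t.length).find?
      (fun k => decide (2 * (((t.take (k + 1)).count x : Int)) = (1 + (k : Int)) + δ))).map
    (· + 1)).getD t.length

theorem solutionNfind_eq_Ffind (t : List Char) (x : Char) (δ : Int) :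
    solutionNfind t x δ = solutionFfind t x δ := by
  induction t generalizing δ with
  | nil => simp [solutionNfind, solutionFfind]
  | cons c tt ih =>
    unfold solutionNfind solutionFfind
    simp only [List.length_cons]
    rw [List.range_succ_eq_map]
    by_cases h0 : (if c = x then δ - 1 else δ + 1) = 0
    · have hhead : decide (2 * ((((c :: tt).take (0 + 1)).count x : Int)) = (1 + ((0 : Nat) : Int)) + δ) = true := by
        by_cases hc : c = x
        · rw [if_pos hc] at h0
          subst hc
          simp only [List.take_succ_cons, List.take_zero, List.count_cons, List.count_nil, BEq.rfl, if_pos]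
          rw [decide_eq_true_eq]
          push_cast
          omega
        · rw [if_neg hc] at h0
          simp only [List.take_succ_cons, List.take_zero, List.count_cons, List.count_nil]
          rw [if_neg (by simpa using hc : ¬ (c == x) = true)]
          rw [decide_eq_true_eq]
          push_cast
          omega
      rw [if_pos h0]
      simp only [List.find?_cons]
      rw [hhead]
      simp
    · have hhead : decide (2 * ((((c :: tt).take (0 + 1)).count x : Int)) = (1 + ((0 : Nat) : Int)) + δ) = false := by
        by_cases hc : c = x
        · rw [if_pos hc] at h0
          subst hc
          simp only [List.take_succ_cons, List.take_zero, List.count_cons, List.count_nil, BEq.rfl, if_pos]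
          rw [decide_eq_false_iff_not]
          push_cast
          omega
        · rw [if_neg hc] at h0
          simp only [List.take_succ_cons, List.take_zero, List.count_cons, List.count_nil]
          rw [if_neg (by simpa using hc : ¬ (c == x) = true)]
          rw [decide_eq_false_iff_not]
          push_cast
          omega
      rw [if_neg h0]
      simp only [List.find?_cons]
      rw [hhead]
      simp only [List.find?_map]
      have hcomp :
          ((fun k : Nat => decide (2 * ((((c :: tt).take (k + 1)).count x : Int)) = (1 + (k : Int)) + δ)) ∘ Nat.succ)
          = (fun k : Nat => decide (2 * (((tt.take (k + 1)).count x : Int)) = (1 + (k : Int)) + (if c = x then δ - 1 else δ + 1))) := by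
        funext k
        simp only [Function.comp_apply, Nat.succ_eq_add_one]
        by_cases hc : c = x
        · rw [if_pos hc]
          subst hc
          simp only [List.take_succ_cons, List.count_cons, BEq.rfl, if_pos]
          rw [decide_eq_decide]
          push_cast
          omega
        · rw [if_neg hc]
          simp only [List.take_succ_cons, List.count_cons]
          rw [if_neg (by simpa using hc : ¬ (c == x) = true)]
          rw [decide_eq_decide]
          push_cast
          omega
      rw [hcomp]
      have hih := ih (if c = x then δ - 1 else δ + 1)
      unfold solutionNfind at hih
      cases hf : (List.range tt.length).find?
          (fun k => decide (2 * (((tt.take (k + 1)).count x : Int)) = (1 + (k : Int)) + (if c = x then δ - 1 else δ + 1))) with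
      | some k =>
        rw [hf] at hih
        simp only [Option.map_some, Option.getD_some] at hih ⊢
        omega
      | none =>
        rw [hf] at hih
        simp only [Option.map_none, Option.getD_none] at hih ⊢
        omega

-- B's ported search equals the Nat-level characterisation (at offset 0)
theorem solutionSegAlt_eq (t : List Char) (x : Char) :
    solutionSegAlt t x = (solutionFfind t x 0 : Int) := by
  rw [← solutionNfind_eq_Ffind]
  unfold solutionSegAlt solutionNfind
  rw [PySem.List.pyRange_one]
  have hn : (((t.length : Int) + 1) - 1).toNat = t.length := by omega
  rw [hn, List.find?_map]
  have hcomp :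
      ((fun j : Int => 2 * ((PySem.List.slice t none (some j)).count x : Int) == j) ∘ (fun k : Nat => (1 : Int) + k))
      = (fun k : Nat => decide (2 * (((t.take (k + 1)).count x : Int)) = (1 + (k : Int)) + 0)) := by
    funext k
    simp only [Function.comp_apply]
    rw [PySem.List.slice_to t (show (0 : Int) ≤ 1 + (k : Int) by positivity)]
    rw [show ((1 : Int) + (k : Int)).toNat = k + 1 by omega, Int.add_zero]
    by_cases h : (2 * ((t.take (k + 1)).count x : Int)) = 1 + (k : Int) <;> simp [h]
  rw [hcomp]
  cases hf : (List.range t.length).find?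
      (fun k => decide (2 * (((t.take (k + 1)).count x : Int)) = (1 + (k : Int)) + 0)) with
  | some k =>
    simp only [Option.map_some, Option.getD_some]
    push_cast
    omega
  | none =>
    simp only [Option.map_none, Option.getD_none]

-- recursion form of B's loop, for the proofs
def solutionGoAlt : List Char → Int
  | [] => 0
  | x :: r =>
    1 + solutionGoAlt (PySem.List.slice (x :: r) (some (solutionSegAlt (x :: r) x)) none)
termination_by l => l.length
decreasing_by
  exact solutionSegAlt_slice_lt x r

theorem solutionLoopAlt_eq (n : Nat) : ∀ (t : List Char) (a : Int), t.length ≤ n →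
    solutionLoopAlt t a = a + solutionGoAlt t := by
  induction n with
  | zero =>
    intro t a ht
    have : t = [] := List.eq_nil_of_length_eq_zero (Nat.le_zero.mp ht)
    subst this
    simp [solutionLoopAlt, solutionGoAlt]
  | succ n ih =>
    intro t a ht
    cases t with
    | nil => simp [solutionLoopAlt, solutionGoAlt]
    | cons x r =>
      rw [solutionLoopAlt, solutionGoAlt]
      have hlt := solutionSegAlt_slice_lt x r
      rw [ih _ (a + 1) (by simp only [List.length_cons] at ht hlt; omega)]
      ring

-- the proof-side segmentation equals B's recursion
theorem solutionGoB_eq_alt (n : Nat) : ∀ (t : List Char), t.length ≤ n → solutionGoB t = solutionGoAlt t := by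
  induction n with
  | zero =>
    intro t ht
    have : t = [] := List.eq_nil_of_length_eq_zero (Nat.le_zero.mp ht)
    subst this
    simp [solutionGoB, solutionGoAlt]
  | succ n ih =>
    intro t ht
    cases t with
    | nil => simp [solutionGoB, solutionGoAlt]
    | cons x r =>
      rw [solutionGoB, solutionGoAlt]
      congr 1
      have hseg : solutionSegAlt (x :: r) x = (solutionFfind (x :: r) x 0 : Int) :=
        solutionSegAlt_eq (x :: r) x
      have hFf : solutionFfind (x :: r) x 0 = 1 + solutionFfind r x (-1) := by
        simp only [solutionFfind]
        norm_num
      have h0 : (0 : Int) ≤ (solutionFfind (x :: r) x 0 : Int) := Int.natCast_nonneg _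
      have hslice : PySem.List.slice (x :: r) (some (solutionSegAlt (x :: r) x)) none
          = r.drop (solutionFfind r x (-1)) := by
        rw [hseg, PySem.List.slice_from _ h0, Int.toNat_natCast, hFf, Nat.add_comm 1 _,
          List.drop_succ_cons]
      rw [hslice]
      have hscan : solutionScanB r x 1 0 = r.drop (solutionFfind r x (-1)) := by
        have h10 := solutionScanB_eq_drop r x 1 0 (by norm_num)
        rw [show (0 : Int) - 1 = -1 by norm_num] at h10
        exact h10
      rw [hscan]
      have hdl : (r.drop (solutionFfind r x (-1))).length ≤ r.length := by
        rw [List.length_drop]; omega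
      simp only [List.length_cons] at ht
      exact ih _ (by omega)

-- joint invariant for A's fold:
--  (i)  from a flag=true state, the remaining fold adds solutionGoB l to the answer;
--  (ii) mid-segment (flag=false, cnt1 ≠ cnt2), the remaining fold adds solutionGoB of the
--       suffix left after the scanner finishes the current segment (same=cnt2, diff=cnt1).
theorem solution_invariant (n : Nat) (l : List Char) (hn : l.length ≤ n) :
    (∀ (a : Int) (st : Char) (c1 c2 : Int),
        (l.foldl solutionStepA (a, true, st, c1, c2)).1 = a + solutionGoB l) ∧
    (∀ (a : Int) (x : Char) (c1 c2 : Int), c1 ≠ c2 →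
        (l.foldl solutionStepA (a, false, x, c1, c2)).1 = a + solutionGoB (solutionScanB l x c2 c1)) := by
  induction n generalizing l with
  | zero =>
    have : l = [] := List.eq_nil_of_length_eq_zero (Nat.le_zero.mp hn)
    subst this
    constructor
    · intro a st c1 c2; simp [solutionGoB]
    · intro a x c1 c2 h
      unfold solutionScanB
      rw [if_neg (Ne.symm h)]
      simp [solutionGoB]
  | succ n ih =>
    constructor
    · intro a st c1 c2
      cases l with
      | nil => simp [solutionGoB]
      | cons c t =>
        have ht : t.length ≤ n := Nat.le_of_succ_le_succ hn
        have step : solutionStepA (a, true, st, c1, c2) c = (a + 1, false, c, 0, 1) := by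
          unfold solutionStepA; simp
        rw [List.foldl_cons, step]
        have := (ih t ht).2 (a + 1) c 0 1 (by decide)
        rw [this, solutionGoB]
        ring
    · intro a x c1 c2 h
      cases l with
      | nil =>
        unfold solutionScanB
        rw [if_neg (Ne.symm h)]
        simp [solutionGoB]
      | cons c t =>
        have ht : t.length ≤ n := Nat.le_of_succ_le_succ hn
        rw [List.foldl_cons]
        by_cases hc : c = x
        · have step : solutionStepA (a, false, x, c1, c2) c = (a, c1 == c2 + 1, x, c1, c2 + 1) := by
            unfold solutionStepA; simp [hc]
          rw [step]
          have hscan : solutionScanB (c :: t) x c2 c1 = solutionScanB t x (c2 + 1) c1 := by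
            conv_lhs => rw [solutionScanB.eq_def]
            rw [if_neg (Ne.symm h)]
            simp [hc]
          rw [hscan]
          by_cases he : c1 = c2 + 1
          · rw [beq_iff_eq.mpr he]
            have hs2 : solutionScanB t x (c2 + 1) c1 = t := by
              conv_lhs => rw [solutionScanB.eq_def]
              rw [if_pos he.symm]
            rw [hs2]
            exact (ih t ht).1 a x c1 (c2 + 1)
          · rw [beq_eq_false_iff_ne.mpr he]
            exact (ih t ht).2 a x c1 (c2 + 1) he
        · have step : solutionStepA (a, false, x, c1, c2) c = (a, c1 + 1 == c2, x, c1 + 1, c2) := by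
            unfold solutionStepA; simp [hc]
          rw [step]
          have hscan : solutionScanB (c :: t) x c2 c1 = solutionScanB t x c2 (c1 + 1) := by
            conv_lhs => rw [solutionScanB.eq_def]
            rw [if_neg (Ne.symm h)]
            simp [hc]
          rw [hscan]
          by_cases he : c1 + 1 = c2
          · rw [beq_iff_eq.mpr he]
            have hs2 : solutionScanB t x c2 (c1 + 1) = t := by
              conv_lhs => rw [solutionScanB.eq_def]
              rw [if_pos he.symm]
            rw [hs2]
            exact (ih t ht).1 a x (c1 + 1) c2
          · rw [beq_eq_false_iff_ne.mpr he]
            exact (ih t ht).2 a x (c1 + 1) c2 he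

-- ===== VERDICT (by name: the statement is the Claim_ definition above) =====
theorem solution_spec : Claim_equal_solution := by
  intro s _
  unfold Spec_solution solution solution_alt
  have h1 := (solution_invariant s.toList.length s.toList (le_refl _)).1 0 'a' 0 0
  rw [h1, solutionGoB_eq_alt s.toList.length s.toList (le_refl _),
    solutionLoopAlt_eq s.toList.length s.toList 0 (le_refl _)]
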